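-- pv_equiv track=rewrite | github.com/ronaldocordeiro/MQB_CRC_padding_byte_finder | find_CRC_padding_byte.py | findKey
-- ===== SOURCE A (Python) =====
-- def findKey(msgBody):
--     crcLookupTable = [ 0, 47, 94, 113, 188, 147, 226, 205, 87, 120, 9, 38, 235, 196, 181, 154, 174, 129, 240, 223, 18, 61, 76, 99, 249, 214, 167, 136, 69, 106,
--      27, 52, 115, 92, 45, 2, 207, 224, 145, 190,  36, 11, 122, 85, 152, 183, 198, 233, 221, 242, 131, 172, 97, 78, 63, 16, 138, 165, 212, 251, 54, 25, 104, 71, 230, 201, 184, 151, 90, 117,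
--      4, 43, 177, 158, 239, 192, 13, 34, 83, 124, 72, 103, 22, 57, 244, 219, 170, 133, 31, 48, 65, 110, 163, 140, 253, 210, 149, 186, 203, 228, 41, 6, 119, 88, 194, 237, 156, 179, 126, 81,
--      32, 15, 59, 20, 101, 74, 135, 168, 217, 246, 108, 67, 50, 29, 208, 255, 142, 161, 227, 204, 189, 146, 95, 112, 1, 46, 180, 155, 234, 197, 8, 39, 86, 121, 77, 98, 19, 60, 241, 222,
--      175, 128, 26, 53, 68, 107, 166, 137, 248, 215, 144, 191, 206, 225, 44, 3, 114, 93, 199, 232, 153, 182, 123, 84, 37, 10, 62, 17, 96, 79, 130, 173, 220, 243, 105, 70, 55, 24, 213, 250,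
--      139, 164, 5, 42, 91, 116, 185, 150, 231, 200, 82, 125, 12, 35, 238, 193, 176, 159, 171, 132, 245, 218, 23, 56, 73, 102, 252, 211, 162, 141, 64, 111, 30, 49, 118, 89, 40, 7, 202, 229,
--      148, 187, 33, 14, 127, 80, 157, 178, 195, 236, 216, 247, 134, 169, 100, 75, 58, 21, 143, 160, 209, 254, 51, 28, 109, 66]
--
--     msgLen=len(msgBody)
--     crc = 0xFF
--     for i in range(1,msgLen):
--         crc^=msgBody[i]
--         crc=crcLookupTable[crc]
--
--     key=crcLookupTable.index(msgBody[0]^0xFF) ^ crc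
--     return key
-- ===== SOURCE B (Python) =====
-- def findKey(msgBody):
--     # GF(2)-polynomial view of the CRC: the whole message is assembled into ONE big
--     # integer (one polynomial) and reduced mod P = x^8+x^5+x^3+x^2+x+1 by power-of-two
--     # folding (carry-less multiply of the high half by x^(2^j) mod P), instead of a
--     # per-byte checksum pass; the padding byte is recovered by running the 8-bit
--     # shift register BACKWARDS (algebraic inversion) instead of searching a table.
--     P = 0x12F
--
--     def polymod(n):  # remainder of n mod P in GF(2)[x] (used on short values only)
--         while n > 0xFF:
--             n ^= P << (n.bit_length() - 9)
--         return n
--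
--     def clmul(a, b):  # carry-less product
--         r = 0
--         while b:
--             if b & 1:
--                 r ^= a
--             a <<= 1
--             b >>= 1
--         return r
--
--     def mulmod(a, b):
--         return polymod(clmul(a, b))
--
--     def xpow2(j):  # x^(2^j) mod P, j >= 3
--         t = 0x2F
--         for _ in range(j - 3):
--             t = mulmod(t, t)
--         return t
--
--     # 1. the message (init value 0xFF folded into its first byte, times x^8) as one polynomial
--     data = [b & 0xFF for b in msgBody[1:]]
--     if data:
--         data[0] ^= 0xFF
--         data.append(0)
--         N = int.from_bytes(bytes(data), 'big')
--     else:
--         N = 0xFF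
--
--     # 2. reduce N mod P by folding the high half down, halving the size each round
--     while N > 0xFF:
--         s = N.bit_length()
--         if s <= 16:
--             N = polymod(N)
--         else:
--             j = (s - 1).bit_length() - 1
--             k = 1 << j
--             N = clmul(N >> k, xpow2(j)) ^ (N & ((1 << k) - 1))
--     crc = N
--
--     # 3. invert the 8-step shift register on the target byte (unique preimage)
--     r = (msgBody[0] ^ 0xFF) & 0xFF
--     for _ in range(8):
--         r = ((r ^ 0x2F) >> 1) | 0x80 if r & 1 else r >> 1
--     return r ^ crc
-- ===== Notes on version B (the rewrite author's own statement) =====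
-- stated objective: alternative
-- what changed: Instead of a per-byte pass through a 256-entry lookup table, B assembles the whole message into one big integer (one GF(2) polynomial) and reduces it mod x^8+x^5+x^3+x^2+x+1 by power-of-two folding with carry-less multiplication by precomputed x^(2^j) mod P, and replaces the table scan crcLookupTable.index(...) by an O(1) algebraic inversion of the 8-step shift register.
-- outside the precondition, e.g. on findKey([]): A raises IndexError, B raises IndexError
import Mathlib
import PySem

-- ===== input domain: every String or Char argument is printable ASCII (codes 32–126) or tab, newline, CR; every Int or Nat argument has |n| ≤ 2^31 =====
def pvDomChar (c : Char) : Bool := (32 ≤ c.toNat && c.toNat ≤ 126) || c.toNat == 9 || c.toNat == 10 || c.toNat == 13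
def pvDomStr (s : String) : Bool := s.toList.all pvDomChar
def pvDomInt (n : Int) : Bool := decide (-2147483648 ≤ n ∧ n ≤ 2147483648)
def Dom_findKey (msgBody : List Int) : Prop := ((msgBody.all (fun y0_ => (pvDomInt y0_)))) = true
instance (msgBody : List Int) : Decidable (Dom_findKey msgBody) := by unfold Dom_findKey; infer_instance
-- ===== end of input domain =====

set_option maxRecDepth 100000
set_option maxHeartbeats 1000000


-- B views the CRC as GF(2)-polynomial arithmetic: the whole message is assembled into ONE big
-- integer and reduced mod P = x^8+x^5+x^3+x^2+x+1 by power-of-two folding (carry-less multiply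
-- of the high half by x^(2^j) mod P), instead of A's per-byte table pass; the padding byte is
-- recovered by running the 8-bit shift register BACKWARDS instead of scanning a table
-- (objective: alternative — a genuinely different algorithm of similar cost, no magic table).

-- ===== PORT A =====
def pvCrcTable : List Int := [0, 47, 94, 113, 188, 147, 226, 205, 87, 120, 9, 38, 235, 196, 181, 154, 174, 129, 240, 223, 18, 61, 76, 99, 249, 214, 167, 136, 69, 106, 27, 52, 115, 92, 45, 2, 207, 224, 145, 190, 36, 11, 122, 85, 152, 183, 198, 233, 221, 242, 131, 172, 97, 78, 63, 16, 138, 165, 212, 251, 54, 25, 104, 71, 230, 201, 184, 151, 90, 117, 4, 43, 177, 158, 239, 192, 13, 34, 83, 124, 72, 103, 22, 57, 244, 219, 170, 133, 31, 48, 65, 110, 163, 140, 253, 210, 149, 186, 203, 228, 41, 6, 119, 88, 194, 237, 156, 179, 126, 81, 32, 15, 59, 20, 101, 74, 135, 168, 217, 246, 108, 67, 50, 29, 208, 255, 142, 161, 227, 204, 189, 146, 95, 112, 1, 46, 180, 155, 234, 197, 8, 39, 86, 121, 77, 98, 19, 60, 241, 222, 175, 128, 26, 53, 68, 107, 166, 137,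 248, 215, 144, 191, 206, 225, 44, 3, 114, 93, 199, 232, 153, 182, 123, 84, 37, 10, 62, 17, 96, 79, 130, 173, 220, 243, 105, 70, 55, 24, 213, 250, 139, 164, 5, 42, 91, 116, 185, 150, 231, 200, 82, 125, 12, 35, 238, 193, 176, 159, 171, 132, 245, 218, 23, 56, 73, 102, 252, 211, 162, 141, 64, 111, 30, 49, 118, 89, 40, 7, 202, 229, 148, 187, 33, 14, 127, 80, 157, 178, 195, 236, 216, 247, 134, 169, 100, 75, 58, 21, 143, 160, 209, 254, 51, 28, 109, 66]

-- 'for i in range(1,msgLen): crc^=msgBody[i]; crc=crcLookupTable[crc]' — msgBody[i] is always in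
-- range for these i, so pyGetD is exact; the table lookup can raise, hence the Option state.
def findKey (msgBody : List Int) : Int :=
  let crc? : Option Int :=
    (PySem.List.pyRange 1 (PySem.List.len msgBody) 1).foldl
      (fun c? i => c?.bind (fun c =>
        PySem.List.pyGet? pvCrcTable (PySem.Int.bxor c (PySem.List.pyGetD msgBody i 0))))
      (some 255)
  match PySem.List.pyGet? msgBody 0 with
  | none => 0      -- IndexError on empty msgBody (excluded by Pre_)
  | some x0 =>
    match PySem.List.index? pvCrcTable (PySem.Int.bxor x0 255), crc? with
    | some k, some c => PySem.Int.bxor (k : Int) c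
    | _, _ => 0    -- ValueError / IndexError (excluded by Pre_)

-- ===== PORT B =====
-- b & 0xFF (the value is ≥ 0, so .toNat is exact)
def pvByte (b : Int) : Nat := (PySem.Int.band b 255).toNat

-- polymod(n): 'while n > 0xFF: n ^= P << (n.bit_length() - 9)'; the top set bit is cleared each
-- round, so Nat.size n rounds always suffice (proved below) — fuel-structural port of the while.
def pvPolymodF : Nat → Nat → Nat
  | 0, n => n
  | f+1, n => if 255 < n then pvPolymodF f (n ^^^ (303 <<< (Nat.size n - 9))) else n

def pvPolymod (n : Nat) : Nat := pvPolymodF (Nat.size n) n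

-- clmul(a,b): 'while b: if b & 1: r ^= a; a <<= 1; b >>= 1' (fuel = Nat.size b suffices)
def pvClmulF : Nat → Nat → Nat → Nat
  | 0, _, _ => 0
  | f+1, a, b => if b = 0 then 0 else (if b &&& 1 = 1 then a else 0) ^^^ pvClmulF f (a <<< 1) (b >>> 1)

def pvClmul (a b : Nat) : Nat := pvClmulF (Nat.size b) a b

def pvMulmod (a b : Nat) : Nat := pvPolymod (pvClmul a b)

-- xpow2(j): x^(2^j) mod P by repeated squaring from x^8 = 0x2F
def pvXpow2 (j : Nat) : Nat := (List.range (j - 3)).foldl (fun t _ => pvMulmod t t) 47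

-- the main reduction loop: 'while N > 0xFF: …' — each round strictly lowers N.bit_length()
-- (proved below), so Nat.size N rounds of fuel always suffice.
def pvFoldF : Nat → Nat → Nat
  | 0, n => n
  | f+1, n =>
    if 255 < n then
      (if Nat.size n ≤ 16 then pvFoldF f (pvPolymod n)
       else
         let j := Nat.size (Nat.size n - 1) - 1
         pvFoldF f (pvClmul (n >>> (1 <<< j)) (pvXpow2 j) ^^^ (n &&& ((1 <<< (1 <<< j)) - 1))))
    else n

-- the message as one polynomial: int.from_bytes(bytes(data),'big') = foldl (N<<8 | d)
def pvAccum (msgBody : List Int) : Nat :=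
  match (msgBody.drop 1).map pvByte with
  | [] => 255
  | d0 :: rest => ((d0 ^^^ 255) :: (rest ++ [0])).foldl (fun N d => (N <<< 8) ||| d) 0

-- 'for _ in range(8): r = ((r ^ 0x2F) >> 1) | 0x80 if r & 1 else r >> 1'
def pvInv8 (r : Nat) : Nat :=
  (List.range 8).foldl (fun r _ => if r &&& 1 = 1 then ((r ^^^ 47) >>> 1) ||| 128 else r >>> 1) r

def findKey_alt (msgBody : List Int) : Int :=
  let N := pvAccum msgBody
  let crc := pvFoldF (Nat.size N) N
  let r := pvInv8 (pvByte (PySem.Int.bxor (msgBody.headD 0) 255))   -- msgBody[0]; [] is outside Pre_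
  ((r ^^^ crc : Nat) : Int)

-- ===== PRECONDITION & SPEC =====
-- Pre_ is exactly the inputs where A returns: on [] A raises IndexError; a first element outside
-- 0..255 makes .index raise ValueError; a later element outside -256..255 drives the running crc
-- out of the table's (wrapping) index range and A raises IndexError.
def Pre_findKey (msgBody : List Int) : Prop :=
  msgBody ≠ [] ∧ 0 ≤ msgBody.headD 0 ∧ ∀ y ∈ msgBody, -256 ≤ y ∧ y < 256
instance (msgBody : List Int) : Decidable (Pre_findKey msgBody) := by unfold Pre_findKey; infer_instance
def pvWitness_findKey : List Int := ([18, 52, 86, 255, -3])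

def Spec_findKey (msgBody : List Int) (out : Int) : Prop := out = findKey_alt msgBody
instance (msgBody : List Int) (out : Int) : Decidable (Spec_findKey msgBody out) := by unfold Spec_findKey; infer_instance

-- ===== CLAIM (what is proved, stated in full; the proofs are below) =====
def Claim_equal_findKey : Prop := ∀ (msgBody : List Int), Dom_findKey msgBody → Pre_findKey msgBody → Spec_findKey msgBody (findKey msgBody)

-- ===== LEMMAS AND PROOFS =====
theorem pv_two_pow_pos {n : Nat} : 0 < 2 ^ n := Nat.two_pow_pos n


-- toolbox
theorem tb_topbit {n : Nat} (h : n ≠ 0) : n.testBit (n.size - 1) = true := by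
  have h1 : 2 ^ (n.size - 1) ≤ n := Nat.lt_size.mp (by
    have := Nat.size_pos.mpr (Nat.pos_of_ne_zero h); omega)
  have h2 : n < 2 ^ n.size := Nat.size_le.mp le_rfl
  rw [Nat.testBit_eq_decide_div_mod_eq]
  have hd1 : 1 ≤ n / 2 ^ (n.size - 1) := (Nat.le_div_iff_mul_le (pv_two_pow_pos)).mpr (by omega)
  have hd2 : n / 2 ^ (n.size - 1) < 2 := by
    apply Nat.div_lt_of_lt_mul
    have : 2 ^ n.size = 2 ^ (n.size - 1) * 2 := by
      rw [← Nat.pow_succ]; congr 1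
      have := Nat.size_pos.mpr (Nat.pos_of_ne_zero h); omega
    omega
  have : n / 2 ^ (n.size - 1) = 1 := by omega
  simp [this]

theorem tb_lt_of_topbit_false {z s : Nat} (h1 : z < 2 ^ s) (h2 : z.testBit (s - 1) = false) (hs : 0 < s) :
    z < 2 ^ (s - 1) := by
  rw [Nat.testBit_eq_decide_div_mod_eq] at h2
  have h2' : z / 2 ^ (s - 1) % 2 ≠ 1 := by simpa using h2
  have hd2 : z / 2 ^ (s - 1) < 2 := by
    apply Nat.div_lt_of_lt_mul
    have : 2 ^ s = 2 ^ (s - 1) * 2 := by rw [← Nat.pow_succ]; congr 1; omega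
    omega
  have hz : z / 2 ^ (s - 1) = 0 := by
    have : z / 2 ^ (s - 1) ≤ 1 := by omega
    rcases Nat.le_one_iff_eq_zero_or_eq_one.mp this with h | h
    · exact h
    · exact absurd (by rw [h]) h2'
  have hdm := Nat.div_add_mod z (2 ^ (s - 1))
  rw [hz, Nat.mul_zero, Nat.zero_add] at hdm
  rw [← hdm]
  exact Nat.mod_lt _ pv_two_pow_pos

theorem tb_xor_size_lt {x y : Nat} (hx : x ≠ 0) (hsz : y.size < x.size) : (x ^^^ y).size = x.size := by
  have h2 : x ^^^ y < 2 ^ x.size :=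
    Nat.xor_lt_two_pow (Nat.size_le.mp le_rfl) (lt_of_lt_of_le (Nat.size_le.mp le_rfl) (Nat.pow_le_pow_right (by norm_num) (le_of_lt hsz)))
  have hbit : (x ^^^ y).testBit (x.size - 1) = true := by
    rw [Nat.testBit_xor, tb_topbit hx]
    have : y.testBit (x.size - 1) = false :=
      Nat.testBit_lt_two_pow (lt_of_lt_of_le (Nat.size_le.mp le_rfl) (Nat.pow_le_pow_right (by norm_num) (by omega)))
    simp [this]
  have hge : 2 ^ (x.size - 1) ≤ x ^^^ y := by
    by_contra hlt
    push Not at hlt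
    rw [Nat.testBit_lt_two_pow hlt] at hbit; exact absurd hbit (by simp)
  have h3 : x.size - 1 < (x ^^^ y).size := Nat.lt_size.mpr hge
  have h4 : (x ^^^ y).size ≤ x.size := Nat.size_le.mpr h2
  have := Nat.size_pos.mpr (Nat.pos_of_ne_zero hx)
  omega

-- clearing the common top bit
theorem tb_xor_same_size {x y : Nat} (hx : x ≠ 0) (hy : y ≠ 0) (h : x.size = y.size) :
    (x ^^^ y).size < x.size := by
  have hs : 0 < x.size := Nat.size_pos.mpr (Nat.pos_of_ne_zero hx)
  have h2 : x ^^^ y < 2 ^ x.size :=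
    Nat.xor_lt_two_pow (Nat.size_le.mp le_rfl) (by rw [h] at *; exact Nat.size_le.mp le_rfl)
  have hbit : (x ^^^ y).testBit (x.size - 1) = false := by
    rw [Nat.testBit_xor, tb_topbit hx, h, tb_topbit hy]; rfl
  have := tb_lt_of_topbit_false h2 hbit hs
  exact lt_of_le_of_lt (Nat.size_le.mpr this) (by omega)

theorem tb_or_eq_xor {x d : Nat} (h : x &&& d = 0) : x ||| d = x ^^^ d := by
  apply Nat.eq_of_testBit_eq
  intro i
  have := congrArg (fun z => z.testBit i) h
  simp only [Nat.testBit_and, Nat.zero_testBit] at this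
  rw [Nat.testBit_or, Nat.testBit_xor]
  cases hx : x.testBit i <;> cases hd : d.testBit i <;> simp [hx, hd] at this ⊢

theorem tb_shift_and_small {x d : Nat} (h : d < 256) : (x <<< 8) &&& d = 0 := by
  apply Nat.eq_of_testBit_eq
  intro i
  simp only [Nat.testBit_and, Nat.testBit_shiftLeft, Nat.zero_testBit]
  by_cases hi : 8 ≤ i
  · have h8 : (256:Nat) ≤ 2 ^ i := by
      calc (256:Nat) = 2 ^ 8 := by norm_num
      _ ≤ 2 ^ i := Nat.pow_le_pow_right (by norm_num) hi
    have : d.testBit i = false := Nat.testBit_lt_two_pow (lt_of_lt_of_le h h8)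
    simp [this]
  · simp [hi]

-- ---- carry-less (GF(2)) multiplication, recursion on the second argument ----
def gmul (a b : Nat) : Nat :=
  if b = 0 then 0 else (if b % 2 = 1 then a else 0) ^^^ gmul (2 * a) (b / 2)
termination_by b
decreasing_by exact Nat.div_lt_self (Nat.pos_of_ne_zero (by assumption)) (by norm_num)

theorem gmul_zero_right (a : Nat) : gmul a 0 = 0 := by simp [gmul]

theorem gmul_eq (a b : Nat) (hb : b ≠ 0) :
    gmul a b = (if b % 2 = 1 then a else 0) ^^^ gmul (2 * a) (b / 2) := by
  rw [gmul]; simp [hb]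

theorem gmul_zero_left (b : Nat) : gmul 0 b = 0 := by
  induction b using Nat.strong_induction_on with
  | _ b ih =>
    by_cases hb : b = 0
    · simp [hb, gmul_zero_right]
    · rw [gmul_eq _ _ hb, Nat.mul_zero, ih (b / 2) (Nat.div_lt_self (Nat.pos_of_ne_zero hb) (by norm_num))]
      simp

theorem gmul_one_right (a : Nat) : gmul a 1 = a := by
  rw [gmul_eq _ _ (by norm_num)]
  simp [gmul_zero_right]

-- 2*(x ^^^ y) = 2*x ^^^ 2*y
theorem two_mul_xor (x y : Nat) : 2 * (x ^^^ y) = 2 * x ^^^ 2 * y := by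
  have h : ∀ z : Nat, 2 * z = z <<< 1 := fun z => by rw [Nat.shiftLeft_eq]; ring
  rw [h, h, h]
  apply Nat.eq_of_testBit_eq
  intro i
  simp [Nat.testBit_shiftLeft, Nat.testBit_xor]
  by_cases h1 : 1 ≤ i <;> simp [h1]

theorem gmul_double_left (a b : Nat) : gmul (2 * a) b = 2 * gmul a b := by
  induction b using Nat.strong_induction_on generalizing a with
  | _ b ih =>
    by_cases hb : b = 0
    · simp [hb, gmul_zero_right]
    · have hlt := Nat.div_lt_self (Nat.pos_of_ne_zero hb) (show 1 < 2 by norm_num)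
      rw [gmul_eq _ _ hb, gmul_eq _ _ hb, ih (b / 2) hlt (2 * a), two_mul_xor]
      congr 1
      split <;> simp

theorem gmul_double_right (a b : Nat) : gmul a (2 * b) = 2 * gmul a b := by
  by_cases hb : b = 0
  · simp [hb, gmul_zero_right]
  · rw [gmul_eq _ _ (by omega)]
    have h1 : (2 * b) % 2 = 0 := by omega
    have h2 : (2 * b) / 2 = b := by omega
    simp [h1, h2, gmul_double_left]

theorem gmul_xor_left (a a' b : Nat) : gmul (a ^^^ a') b = gmul a b ^^^ gmul a' b := by
  induction b using Nat.strong_induction_on generalizing a a' with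
  | _ b ih =>
    by_cases hb : b = 0
    · simp [hb, gmul_zero_right]
    · have hlt := Nat.div_lt_self (Nat.pos_of_ne_zero hb) (show 1 < 2 by norm_num)
      rw [gmul_eq _ _ hb, gmul_eq _ _ hb, gmul_eq _ _ hb]
      rw [two_mul_xor, ih (b / 2) hlt (2 * a) (2 * a')]
      rcases Nat.mod_two_eq_zero_or_one b with h | h <;>
        simp [h, Nat.xor_assoc, Nat.xor_comm, Nat.xor_left_comm]

theorem xor_div_two (x y : Nat) : (x ^^^ y) / 2 = x / 2 ^^^ y / 2 := by
  have h : ∀ z : Nat, z / 2 = z >>> 1 := fun z => (Nat.shiftRight_one z).symm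
  rw [h, h, h]
  apply Nat.eq_of_testBit_eq
  intro i
  simp [Nat.testBit_shiftRight, Nat.testBit_xor]

theorem xor_mod_two (x y : Nat) : (x ^^^ y) % 2 = (x % 2 + y % 2) % 2 := by
  have h := Nat.testBit_xor x y 0
  simp only [Nat.testBit_zero] at h
  rcases Nat.mod_two_eq_zero_or_one x with h1 | h1 <;>
    rcases Nat.mod_two_eq_zero_or_one y with h2 | h2 <;>
    simp [h1, h2] at h ⊢ <;> omega

theorem gmul_xor_right (a b b' : Nat) : gmul a (b ^^^ b') = gmul a b ^^^ gmul a b' := by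
  induction b using Nat.strong_induction_on generalizing a b' with
  | _ b ih =>
    by_cases hb : b = 0
    · simp [hb, gmul_zero_right]
    · by_cases hb' : b' = 0
      · simp [hb', gmul_zero_right]
      · by_cases hx : b ^^^ b' = 0
        · have : b = b' := by
            have := Nat.xor_eq_zero_iff.mp hx
            exact this
          simp [this, gmul_zero_right]
        · have hlt := Nat.div_lt_self (Nat.pos_of_ne_zero hb) (show 1 < 2 by norm_num)
          rw [gmul_eq _ _ hx, gmul_eq _ _ hb, gmul_eq _ _ hb']
          rw [xor_div_two, ih (b / 2) hlt (2 * a) (b' / 2)]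
          have hm := xor_mod_two b b'
          rcases Nat.mod_two_eq_zero_or_one b with h1 | h1 <;>
            rcases Nat.mod_two_eq_zero_or_one b' with h2 | h2 <;>
            simp [h1, h2] at hm <;>
            simp [h1, h2, hm, Nat.xor_comm, Nat.xor_left_comm]

theorem gmul_pow2_right (a k : Nat) : gmul a (2 ^ k) = a <<< k := by
  induction k generalizing a with
  | zero => simp [gmul_one_right]
  | succ k ih =>
    have : (2:Nat) ^ (k+1) = 2 * 2 ^ k := by ring
    rw [this, gmul_double_right, ih]
    rw [Nat.shiftLeft_eq, Nat.shiftLeft_eq]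
    ring

theorem gmul_assoc (x y b : Nat) : gmul (gmul x y) b = gmul x (gmul y b) := by
  induction b using Nat.strong_induction_on generalizing x y with
  | _ b ih =>
    by_cases hb : b = 0
    · simp [hb, gmul_zero_right]
    · have hlt := Nat.div_lt_self (Nat.pos_of_ne_zero hb) (show 1 < 2 by norm_num)
      rw [gmul_eq (gmul x y) _ hb]
      have h2 : gmul (2 * gmul x y) (b / 2) = gmul x (2 * gmul y (b/2)) := by
        rw [← gmul_double_left, ih (b / 2) hlt (2 * x) y, gmul_double_left, ← gmul_double_right]
      rw [h2]
      conv_rhs => rw [gmul_eq y _ hb]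
      rw [gmul_xor_right]
      congr 1
      · split <;> simp [gmul_zero_right]
      · rw [gmul_double_left, gmul_double_right]

theorem bit_split (b : Nat) : b % 2 ^^^ 2 * (b / 2) = b := by
  apply Nat.eq_of_testBit_eq
  intro i
  rw [Nat.testBit_xor]
  cases i with
  | zero =>
    simp only [Nat.testBit_zero]
    have : 2 * (b / 2) % 2 = 0 := by omega
    rcases Nat.mod_two_eq_zero_or_one b with h | h <;> simp [h, this]
  | succ i =>
    simp only [Nat.testBit_succ]
    have h1 : b % 2 / 2 = 0 := by omega
    have h2 : 2 * (b / 2) / 2 = b / 2 := by omega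
    rw [h1, h2]
    simp [Nat.zero_testBit]

theorem gmul_one_left (b : Nat) : gmul 1 b = b := by
  induction b using Nat.strong_induction_on with
  | _ b ih =>
    by_cases hb : b = 0
    · simp [hb, gmul_zero_right]
    · have hlt := Nat.div_lt_self (Nat.pos_of_ne_zero hb) (show 1 < 2 by norm_num)
      rw [gmul_eq _ _ hb, gmul_double_left, ih (b / 2) hlt]
      conv_rhs => rw [← bit_split b]
      congr 1
      rcases Nat.mod_two_eq_zero_or_one b with h | h <;> simp [h]

theorem gmul_comm (a b : Nat) : gmul a b = gmul b a := by
  induction b using Nat.strong_induction_on generalizing a with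
  | _ b ih =>
    by_cases hb : b = 0
    · simp [hb, gmul_zero_right, gmul_zero_left]
    · have hlt := Nat.div_lt_self (Nat.pos_of_ne_zero hb) (show 1 < 2 by norm_num)
      conv_lhs => rw [← bit_split b]
      conv_rhs => rw [← bit_split b]
      rw [gmul_xor_right, gmul_xor_left, gmul_double_right, gmul_double_left,
        ih (b / 2) hlt a]
      congr 1
      rcases Nat.mod_two_eq_zero_or_one b with h | h <;>
        simp [h, gmul_zero_right, gmul_zero_left, gmul_one_right, gmul_one_left]

theorem size_div_two {b : Nat} (h : b ≠ 0) : b.size = (b/2).size + 1 := by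
  have h1 : b / 2 < 2 ^ (b.size - 1) := by
    have h2 : b < 2 ^ b.size := Nat.size_le.mp le_rfl
    have hs : 0 < b.size := Nat.size_pos.mpr (Nat.pos_of_ne_zero h)
    have : 2 ^ b.size = 2 ^ (b.size - 1) * 2 := by rw [← Nat.pow_succ]; congr 1; omega
    omega
  have h3 : 2 ^ (b.size - 2) ≤ b / 2 ∨ b.size ≤ 1 := by
    by_cases hs : b.size ≤ 1
    · right; exact hs
    · left
      have h4 : 2 ^ (b.size - 1) ≤ b := Nat.lt_size.mp (by omega)
      have : 2 ^ (b.size - 1) = 2 ^ (b.size - 2) * 2 := by rw [← Nat.pow_succ]; congr 1; omega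
      omega
  have hle : (b/2).size ≤ b.size - 1 := Nat.size_le.mpr h1
  rcases h3 with h3 | h3
  · have := Nat.lt_size.mpr h3
    have hs : 0 < b.size := Nat.size_pos.mpr (Nat.pos_of_ne_zero h)
    omega
  · have hs : 0 < b.size := Nat.size_pos.mpr (Nat.pos_of_ne_zero h)
    have hbs : b.size = 1 := by omega
    have hb2 : b / 2 = 0 := by
      have h2 : b < 2 ^ b.size := Nat.size_le.mp le_rfl
      rw [hbs] at h2; omega
    rw [hb2, hbs]
    rfl

theorem size_two_mul {a : Nat} (h : a ≠ 0) : (2 * a).size = a.size + 1 := by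
  have : 2 * a = a <<< 1 := by rw [Nat.shiftLeft_eq]; ring
  rw [this, Nat.size_shiftLeft h]

theorem gmul_size {a b : Nat} (ha : a ≠ 0) (hb : b ≠ 0) :
    (gmul a b).size = a.size + b.size - 1 := by
  induction b using Nat.strong_induction_on generalizing a with
  | _ b ih =>
    by_cases h1 : b / 2 = 0
    · have hb1 : b = 1 := by omega
      subst hb1
      rw [gmul_one_right]
      have hs1 : (1:Nat).size = 1 := rfl
      have := Nat.size_pos.mpr (Nat.pos_of_ne_zero ha)
      omega
    · have hlt := Nat.div_lt_self (Nat.pos_of_ne_zero hb) (show 1 < 2 by norm_num)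
      have hG := ih (b / 2) hlt (a := 2 * a) (by positivity) h1
      have hGsz : (gmul (2 * a) (b / 2)).size = a.size + b.size - 1 := by
        rw [hG, size_two_mul ha, size_div_two hb]
        have := Nat.size_pos.mpr (Nat.pos_of_ne_zero (show b / 2 ≠ 0 from h1))
        omega
      have hGne : gmul (2 * a) (b / 2) ≠ 0 := by
        intro h0
        have h2a : 0 < (2 * a).size := Nat.size_pos.mpr (by positivity)
        have hb2 : 0 < (b / 2).size := Nat.size_pos.mpr (Nat.pos_of_ne_zero h1)
        rw [h0] at hG
        simp only [Nat.size_zero] at hG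
        omega
      rw [gmul_eq _ _ hb]
      have hasz : a.size < (gmul (2 * a) (b / 2)).size := by
        rw [hGsz]
        have hp : 0 < (b / 2).size := Nat.size_pos.mpr (Nat.pos_of_ne_zero h1)
        have hd := size_div_two hb
        omega
      rcases Nat.mod_two_eq_zero_or_one b with h | h
      · simp [h, hGsz]
      · rw [if_pos h, Nat.xor_comm, tb_xor_size_lt hGne hasz, hGsz]

-- ---- congruence mod P = 0x12F (GF(2)) ----
def Cong (x y : Nat) : Prop := ∃ q, x ^^^ y = gmul 303 q

theorem Cong.refl (x : Nat) : Cong x x := ⟨0, by simp [gmul_zero_right]⟩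

theorem Cong.symm {x y : Nat} (h : Cong x y) : Cong y x := by
  obtain ⟨q, hq⟩ := h
  exact ⟨q, by rw [Nat.xor_comm]; exact hq⟩

theorem Cong.trans {x y z : Nat} (h1 : Cong x y) (h2 : Cong y z) : Cong x z := by
  obtain ⟨q1, hq1⟩ := h1
  obtain ⟨q2, hq2⟩ := h2
  refine ⟨q1 ^^^ q2, ?_⟩
  rw [gmul_xor_right, ← hq1, ← hq2]
  rw [show x ^^^ y ^^^ (y ^^^ z) = x ^^^ z from by
    simp [Nat.xor_comm, Nat.xor_left_comm]]

theorem Cong.xorr {x y : Nat} (t : Nat) (h : Cong x y) : Cong (x ^^^ t) (y ^^^ t) := by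
  obtain ⟨q, hq⟩ := h
  refine ⟨q, ?_⟩
  rw [show x ^^^ t ^^^ (y ^^^ t) = x ^^^ y from by
    simp [Nat.xor_comm, Nat.xor_left_comm]]
  exact hq

theorem Cong.gmul_left {x y : Nat} (b : Nat) (h : Cong x y) : Cong (gmul x b) (gmul y b) := by
  obtain ⟨q, hq⟩ := h
  refine ⟨gmul q b, ?_⟩
  rw [← gmul_xor_left, hq, gmul_assoc]

theorem Cong.gmul_right {b b' : Nat} (a : Nat) (h : Cong b b') : Cong (gmul a b) (gmul a b') := by
  obtain ⟨q, hq⟩ := h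
  refine ⟨gmul q a, ?_⟩
  rw [← gmul_xor_right, hq, gmul_comm a, gmul_assoc]

theorem Cong.shiftl {x y : Nat} (k : Nat) (h : Cong x y) : Cong (x <<< k) (y <<< k) := by
  have h1 : ∀ z : Nat, z <<< k = gmul z (2 ^ k) := fun z => (gmul_pow2_right z k).symm
  rw [h1, h1]
  exact h.gmul_left _

theorem cong_xor_pshift (x k : Nat) : Cong (x ^^^ (303 <<< k)) x := by
  refine ⟨2 ^ k, ?_⟩
  rw [show x ^^^ 303 <<< k ^^^ x = 303 <<< k from by
    simp [Nat.xor_comm]]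
  rw [gmul_pow2_right]

theorem cong_unique {x y : Nat} (h : Cong x y) (hx : x < 256) (hy : y < 256) : x = y := by
  obtain ⟨q, hq⟩ := h
  by_cases hq0 : q = 0
  · rw [hq0, gmul_zero_right] at hq
    exact Nat.xor_eq_zero_iff.mp hq
  · exfalso
    have hsz := gmul_size (show (303:Nat) ≠ 0 by norm_num) hq0
    have h303 : (303:Nat).size = 9 := rfl
    have hqs : 0 < q.size := Nat.size_pos.mpr (Nat.pos_of_ne_zero hq0)
    have hge : 9 ≤ (gmul 303 q).size := by omega
    have hlt : x ^^^ y < 256 := Nat.xor_lt_two_pow (n := 8) (by norm_num at hx ⊢; omega) (by omega)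
    rw [hq] at hlt
    have := Nat.lt_size.mp (show 8 < (gmul 303 q).size by omega)
    norm_num at this
    omega

-- ---- polymod (bitwise remainder; fuel = Nat.size n) ----


theorem polymod_step_size {n : Nat} (h : 255 < n) :
    (n ^^^ (303 <<< (Nat.size n - 9))).size < n.size := by
  have hn0 : n ≠ 0 := by omega
  have hs9 : 9 ≤ n.size := by
    have : 8 < n.size := Nat.lt_size.mpr (by norm_num; omega)
    omega
  have hm0 : (303 <<< (n.size - 9)) ≠ 0 := by
    intro h0
    have h1 := Nat.size_shiftLeft (show (303:Nat) ≠ 0 by norm_num) (n.size - 9)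
    rw [h0] at h1
    have h303 : (303:Nat).size = 9 := rfl
    rw [h303] at h1
    simp only [Nat.size_zero] at h1
    omega
  have hms : (303 <<< (n.size - 9)).size = n.size := by
    rw [Nat.size_shiftLeft (show (303:Nat) ≠ 0 by norm_num)]
    have h303 : (303:Nat).size = 9 := rfl
    omega
  exact tb_xor_same_size hn0 hm0 hms.symm

theorem polymodF_lt {f n : Nat} (h : n.size ≤ f) : pvPolymodF f n < 256 := by
  induction f generalizing n with
  | zero =>
    have : n = 0 := Nat.size_eq_zero.mp (by omega)
    simp [pvPolymodF, this]
  | succ f ih =>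
    rw [pvPolymodF]
    split
    · rename_i hgt
      exact ih (by have := polymod_step_size hgt; omega)
    · omega

theorem polymodF_cong (f n : Nat) : Cong (pvPolymodF f n) n := by
  induction f generalizing n with
  | zero => exact Cong.refl n
  | succ f ih =>
    rw [pvPolymodF]
    split
    · exact (ih _).trans (cong_xor_pshift _ _)
    · exact Cong.refl n

theorem pvPolymod_lt (n : Nat) : pvPolymod n < 256 := polymodF_lt le_rfl

theorem pvPolymod_cong (n : Nat) : Cong (pvPolymod n) n := polymodF_cong _ _

theorem pvPolymod_size_le (n : Nat) : (pvPolymod n).size ≤ 8 :=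
  Nat.size_le.mpr (by norm_num; exact pvPolymod_lt n)

-- ---- clmul (fuel = Nat.size b) ----


theorem pvClmulF_eq_gmul {f : Nat} : ∀ {a b : Nat}, b.size ≤ f → pvClmulF f a b = gmul a b := by
  induction f with
  | zero =>
    intro a b h
    have : b = 0 := Nat.size_eq_zero.mp (by omega)
    simp [pvClmulF, this, gmul_zero_right]
  | succ f ih =>
    intro a b h
    rw [pvClmulF]
    split
    · rename_i h0; simp [h0, gmul_zero_right]
    · rename_i h0
      rw [gmul_eq _ _ h0, Nat.and_one_is_mod, Nat.shiftRight_one,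
        ih (by have := size_div_two h0; omega),
        show a <<< 1 = 2 * a from by rw [Nat.shiftLeft_eq]; ring]

theorem pvClmul_eq_gmul (a b : Nat) : pvClmul a b = gmul a b := pvClmulF_eq_gmul le_rfl

-- ---- mulmod, xpow2 ----

theorem pvMulmod_lt (a b : Nat) : pvMulmod a b < 256 := pvPolymod_lt _

theorem pvMulmod_cong (a b : Nat) : Cong (pvMulmod a b) (gmul a b) := by
  rw [pvMulmod, pvClmul_eq_gmul]
  exact pvPolymod_cong _


theorem pvXpow2_spec (j : Nat) (hj : 3 ≤ j) :
    Cong (pvXpow2 j) (2 ^ 2 ^ j) ∧ pvXpow2 j < 256 := by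
  rw [pvXpow2]
  obtain ⟨m, rfl⟩ : ∃ m, j = m + 3 := ⟨j - 3, by omega⟩
  have : m + 3 - 3 = m := by omega
  rw [this]
  clear hj this
  induction m with
  | zero =>
    constructor
    · refine ⟨1, ?_⟩
      rw [gmul_one_right]
      rfl
    · simp only [List.range_zero, List.foldl_nil]
      norm_num
  | succ m ih =>
    rw [List.range_succ, List.foldl_append]
    simp only [List.foldl_cons, List.foldl_nil]
    set t := (List.range m).foldl (fun t _ => pvMulmod t t) 47 with ht
    obtain ⟨ihc, ihlt⟩ := ih
    constructor
    · have h1 : Cong (pvMulmod t t) (gmul t t) := pvMulmod_cong t t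
      have h2 : Cong (gmul t t) (gmul (2 ^ 2 ^ (m+3)) (2 ^ 2 ^ (m+3))) :=
        (ihc.gmul_left t).trans (ihc.gmul_right _)
      have h3 : gmul (2 ^ 2 ^ (m+3)) (2 ^ 2 ^ (m+3)) = 2 ^ 2 ^ (m+4) := by
        rw [gmul_pow2_right, Nat.shiftLeft_eq, ← Nat.pow_add]
        congr 1
        rw [show m + 4 = (m+3) + 1 from by omega, Nat.pow_succ]
        ring
      rw [h3] at h2
      exact h1.trans h2
    · exact pvMulmod_lt t t

theorem split_xor (n k : Nat) : n = ((n >>> k) <<< k) ^^^ (n &&& (2 ^ k - 1)) := by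
  apply Nat.eq_of_testBit_eq
  intro i
  rw [Nat.testBit_xor, Nat.testBit_and, Nat.testBit_shiftLeft, Nat.testBit_two_pow_sub_one]
  by_cases hi : k ≤ i
  · have h1 : decide (i ≥ k) = true := by simp [hi]
    rw [h1, Nat.testBit_shiftRight]
    have h2 : k + (i - k) = i := by omega
    rw [h2]
    have h3 : decide (i < k) = false := by simp; omega
    rw [h3]
    simp
  · have h1 : decide (i ≥ k) = false := by simp; omega
    have h3 : decide (i < k) = true := by simp; omega
    rw [h1, h3]
    simp

theorem size_shiftRight (n k : Nat) : (n >>> k).size = n.size - k := by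
  induction k with
  | zero => simp
  | succ k ih =>
    have hstep : n >>> (k+1) = (n >>> k) / 2 := Nat.shiftRight_succ n k
    rw [hstep]
    by_cases h0 : n >>> k = 0
    · rw [h0]
      have : n.size - k = 0 := by rw [← ih, h0]; rfl
      simp [Nat.size_zero]
      omega
    · have := size_div_two h0
      omega

-- ---- the folding reduction loop (fuel = Nat.size n) ----

theorem gmul_size_le (a b : Nat) : (gmul a b).size ≤ a.size + b.size - 1 ∨ gmul a b = 0 := by
  by_cases ha : a = 0
  · right; rw [ha, gmul_zero_left]
  · by_cases hb : b = 0
    · right; rw [hb, gmul_zero_right]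
    · left; rw [gmul_size ha hb]

theorem pvFoldF_spec {f : Nat} : ∀ {n : Nat}, n.size ≤ f → pvFoldF f n < 256 ∧ Cong (pvFoldF f n) n := by
  induction f with
  | zero =>
    intro n h
    have : n = 0 := Nat.size_eq_zero.mp (by omega)
    rw [pvFoldF, this]
    exact ⟨by norm_num, Cong.refl 0⟩
  | succ f ih =>
    intro n h
    rw [pvFoldF]
    by_cases hgt : 255 < n
    · rw [if_pos hgt]
      have hn0 : n ≠ 0 := by omega
      have hs9 : 9 ≤ n.size := by
        have : 8 < n.size := Nat.lt_size.mpr (by norm_num; omega)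
        omega
      by_cases h16 : Nat.size n ≤ 16
      · rw [if_pos h16]
        have hrec := ih (n := pvPolymod n) (by
          have := pvPolymod_size_le n
          omega)
        exact ⟨hrec.1, hrec.2.trans (pvPolymod_cong n)⟩
      · rw [if_neg h16]
        push Not at h16
        have hone : ∀ m : Nat, (1:Nat) <<< m = 2 ^ m := fun m => by
          rw [Nat.shiftLeft_eq, Nat.one_mul]
        simp only [hone]
        generalize hj' : Nat.size (Nat.size n - 1) - 1 = j
        have hj4 : 4 ≤ j := by
          rw [← hj']
          have h16' : 16 ≤ n.size - 1 := by omega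
          have : 4 < (n.size - 1).size := Nat.lt_size.mpr (by norm_num; omega)
          omega
        have hks : 2 ^ j ≤ n.size - 1 := by
          rw [← hj']
          have hs1 : n.size - 1 ≠ 0 := by omega
          have := Nat.lt_size.mp (show (n.size - 1).size - 1 < (n.size - 1).size from by
            have := Nat.size_pos.mpr (Nat.pos_of_ne_zero hs1); omega)
          exact this
        have hk8 : 8 ≤ 2 ^ j := by
          calc (8:Nat) = 2 ^ 3 := by norm_num
          _ ≤ 2 ^ j := Nat.pow_le_pow_right (by norm_num) (by omega)
        obtain ⟨htc, htlt⟩ := pvXpow2_spec j (by omega)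
        have hsplit : n = ((n >>> 2 ^ j) <<< 2 ^ j) ^^^ (n &&& (2 ^ 2 ^ j - 1)) :=
          split_xor n (2 ^ j)
        have hstep : Cong (pvClmul (n >>> 2 ^ j) (pvXpow2 j) ^^^ (n &&& (2 ^ 2 ^ j - 1))) n := by
          rw [pvClmul_eq_gmul]
          have h1 : Cong (gmul (n >>> 2 ^ j) (pvXpow2 j)) (gmul (n >>> 2 ^ j) (2 ^ 2 ^ j)) :=
            htc.gmul_right _
          have h2 : gmul (n >>> 2 ^ j) (2 ^ 2 ^ j) = (n >>> 2 ^ j) <<< 2 ^ j :=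
            gmul_pow2_right _ _
          rw [h2] at h1
          have h3 := h1.xorr (n &&& (2 ^ 2 ^ j - 1))
          rw [← hsplit] at h3
          exact h3
        have hsz : (pvClmul (n >>> 2 ^ j) (pvXpow2 j) ^^^ (n &&& (2 ^ 2 ^ j - 1))).size ≤ n.size - 1 := by
          have hLlt : n &&& (2 ^ 2 ^ j - 1) < 2 ^ 2 ^ j := by
            rw [Nat.and_two_pow_sub_one_eq_mod]
            exact Nat.mod_lt _ pv_two_pow_pos
          have hHsize : (n >>> 2 ^ j).size = n.size - 2 ^ j := size_shiftRight n _
          have htsize : (pvXpow2 j).size ≤ 8 := Nat.size_le.mpr (by norm_num; omega)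
          rw [pvClmul_eq_gmul]
          rcases gmul_size_le (n >>> 2 ^ j) (pvXpow2 j) with hg | hg
          · have h1 : gmul (n >>> 2 ^ j) (pvXpow2 j) < 2 ^ (n.size - 1) :=
              lt_of_lt_of_le (Nat.size_le.mp le_rfl)
                (Nat.pow_le_pow_right (by norm_num) (by omega))
            have h2 : n &&& (2 ^ 2 ^ j - 1) < 2 ^ (n.size - 1) :=
              lt_of_lt_of_le hLlt (Nat.pow_le_pow_right (by norm_num) (by omega))
            exact Nat.size_le.mpr (Nat.xor_lt_two_pow h1 h2)
          · rw [hg, Nat.zero_xor]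
            have := Nat.size_le.mpr hLlt
            omega
        have hrec := ih (n := pvClmul (n >>> 2 ^ j) (pvXpow2 j) ^^^ (n &&& (2 ^ 2 ^ j - 1))) (by omega)
        exact ⟨hrec.1, hrec.2.trans hstep⟩
    · rw [if_neg hgt]
      exact ⟨by omega, Cong.refl n⟩


theorem and255_id {m : Nat} (h : m < 256) : m &&& 255 = m := by
  have h2 : (255:Nat) = 2 ^ 8 - 1 := rfl
  rw [h2, Nat.and_two_pow_sub_one_eq_mod]
  omega

theorem sub255_xor : ∀ v : Fin 256, 255 - (v : Nat) = 255 ^^^ (v : Nat) := by decide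

theorem and255_id' {m : Nat} (h : m < 256) : 255 &&& m = m := by
  rw [Nat.and_comm]; exact and255_id h

theorem pvByte_nonneg {b : Int} (h0 : 0 ≤ b) (h : b < 256) : pvByte b = b.toNat := by
  rw [pvByte, PySem.Int.band_of_nonneg h0 (by norm_num)]
  simp
  exact and255_id (by omega)

theorem pvByte_neg {b : Int} (h0 : b < 0) (h : -256 ≤ b) : pvByte b = 255 ^^^ (-b-1).toNat := by
  rw [pvByte, PySem.Int.band]
  rw [if_neg (by omega), if_pos (by norm_num : (0:Int) ≤ 255)]
  have hu : (-b-1).toNat < 256 := by omega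
  have h255 : (255:Int).toNat = 255 := rfl
  rw [h255, and255_id' hu]
  have hs := sub255_xor ⟨(-b-1).toNat, hu⟩
  rw [Int.toNat_natCast]
  exact hs

theorem pvByte_lt (b : Int) : pvByte b < 256 := by
  by_cases h0 : 0 ≤ b
  · rw [pvByte, PySem.Int.band_of_nonneg h0 (by norm_num)]
    simp
    have : b.toNat &&& 255 = b.toNat % 256 := by
      have h2 : (255:Nat) = 2 ^ 8 - 1 := rfl
      rw [h2, Nat.and_two_pow_sub_one_eq_mod]
    omega
  · rw [pvByte, PySem.Int.band]
    rw [if_neg h0, if_pos (by norm_num : (0:Int) ≤ 255)]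
    simp
    omega

theorem bxor_byte {c : Nat} (hc : c < 256) {b : Int} (hb1 : -256 ≤ b) (hb2 : b < 256) :
    (-256 ≤ PySem.Int.bxor (c:Int) b ∧ PySem.Int.bxor (c:Int) b < 256) ∧
    (PySem.Int.band (PySem.Int.bxor (c:Int) b) 255).toNat = c ^^^ pvByte b := by
  by_cases h0 : 0 ≤ b
  · rw [PySem.Int.bxor_of_nonneg (by positivity) h0]
    simp only [Int.toNat_natCast]
    have hxl : c ^^^ b.toNat < 256 := Nat.xor_lt_two_pow (n := 8) (by norm_num; omega) (by norm_num; omega)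
    refine ⟨⟨by omega, by omega⟩, ?_⟩
    · rw [PySem.Int.band_of_nonneg (by positivity) (by norm_num)]
      simp only [Int.toNat_natCast]
      have h255 : (255:Int).toNat = 255 := rfl
      rw [h255, and255_id hxl, pvByte_nonneg h0 hb2]
  · push Not at h0
    have hu : (-b-1).toNat < 256 := by omega
    have hxl : c ^^^ (-b-1).toNat < 256 := Nat.xor_lt_two_pow (n := 8) (by norm_num; omega) (by norm_num; omega)
    rw [PySem.Int.bxor]
    rw [if_pos (by positivity), if_neg (by omega)]
    simp only [Int.toNat_natCast]
    constructor
    · constructor <;> [skip; skip] <;> omega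
    · rw [PySem.Int.band]
      rw [if_neg (by omega), if_pos (by norm_num : (0:Int) ≤ 255)]
      have h255 : (255:Int).toNat = 255 := rfl
      have harg : (-(-(c ^^^ (-b-1).toNat : Nat) - 1 : Int) - 1).toNat = (c ^^^ (-b-1).toNat : Nat) := by omega
      rw [h255, harg, and255_id' hxl, Int.toNat_natCast]
      have hs := sub255_xor ⟨c ^^^ (-b-1).toNat, hxl⟩
      rw [pvByte_neg h0 hb1, hs]
      simp [Nat.xor_assoc, Nat.xor_comm]


-- ---- the lookup table IS the polynomial remainder of v·x^8, for Python's wrapping index ----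
theorem T1 : ∀ w : Fin 512, PySem.List.pyGet? pvCrcTable (((w:Nat) : Int) - 256) =
    some ((pvPolymod ((PySem.Int.band (((w:Nat):Int) - 256) 255).toNat <<< 8) : Nat) : Int) := by decide

-- ---- .index over the table = running the shift register backwards ----
theorem T3 : ∀ v : Fin 256, PySem.List.index? pvCrcTable ((v : Nat) : Int) = some (pvInv8 v) := by decide

theorem tab_polymod {z : Int} (h1 : -256 ≤ z) (h2 : z < 256) :
    PySem.List.pyGet? pvCrcTable z =
      some ((pvPolymod ((PySem.Int.band z 255).toNat <<< 8) : Nat) : Int) := by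
  have hw : (((⟨(z + 256).toNat, by omega⟩ : Fin 512) : Nat) : Int) - 256 = z := by
    simp only []; omega
  have h := T1 ⟨(z + 256).toNat, by omega⟩
  rw [hw] at h
  exact h

-- ---- accumulation: B's int.from_bytes build = the per-byte xor-shift polynomial ----
theorem acc_shift : ∀ (bs : List Int) (x : Nat),
    bs.foldl (fun N b => (N ^^^ pvByte b) <<< 8) (x <<< 8)
      = (List.foldl (fun N d => (N <<< 8) ||| d) x (bs.map pvByte)) <<< 8 := by
  intro bs
  induction bs with
  | nil => intro x; rfl
  | cons b bs ih =>
    intro x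
    simp only [List.foldl_cons, List.map_cons]
    rw [show (x <<< 8) ^^^ pvByte b = (x <<< 8) ||| pvByte b from
      (tb_or_eq_xor (tb_shift_and_small (pvByte_lt b))).symm]
    exact ih ((x <<< 8) ||| pvByte b)

theorem pvAccum_eq (x : Int) (xs : List Int) :
    pvAccum (x :: xs) = xs.foldl (fun N b => (N ^^^ pvByte b) <<< 8) 255 := by
  cases xs with
  | nil => rfl
  | cons b bs =>
    show ((pvByte b ^^^ 255) :: (bs.map pvByte ++ [0])).foldl (fun N d => (N <<< 8) ||| d) 0
      = (b :: bs).foldl (fun N b => (N ^^^ pvByte b) <<< 8) 255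
    rw [List.foldl_cons, List.foldl_append]
    simp only [List.foldl_cons, List.foldl_nil]
    have h0 : ((0:Nat) <<< 8) ||| (pvByte b ^^^ 255) = 255 ^^^ pvByte b := by
      rw [Nat.zero_shiftLeft, Nat.zero_or, Nat.xor_comm]
    rw [h0, Nat.or_zero]
    exact (acc_shift bs (255 ^^^ pvByte b)).symm

-- ---- the start value is congruent after each table step ----
theorem gAcc_cong : ∀ (xs : List Int) {c1 c2 : Nat}, Cong c1 c2 →
    Cong (xs.foldl (fun N b => (N ^^^ pvByte b) <<< 8) c1)
         (xs.foldl (fun N b => (N ^^^ pvByte b) <<< 8) c2) := by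
  intro xs
  induction xs with
  | nil => intro c1 c2 h; exact h
  | cons b bs ih =>
    intro c1 c2 h
    simp only [List.foldl_cons]
    exact ih ((h.xorr (pvByte b)).shiftl 8)

-- ---- A's table fold returns a byte congruent to the accumulated polynomial ----
theorem A_fold : ∀ (xs : List Int) (c : Nat), c < 256 → (∀ y ∈ xs, -256 ≤ y ∧ y < 256) →
    ∃ r : Nat, r < 256 ∧ Cong r (xs.foldl (fun N b => (N ^^^ pvByte b) <<< 8) c) ∧
      xs.foldl (fun c? v => c?.bind (fun ci => PySem.List.pyGet? pvCrcTable (PySem.Int.bxor ci v)))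
          (some ((c : Nat) : Int)) = some ((r : Nat) : Int) := by
  intro xs
  induction xs with
  | nil =>
    intro c hc _
    exact ⟨c, hc, Cong.refl c, rfl⟩
  | cons b bs ih =>
    intro c hc hmem
    have hb := hmem b List.mem_cons_self
    obtain ⟨⟨hz1, hz2⟩, hband⟩ := bxor_byte hc hb.1 hb.2
    simp only [List.foldl_cons, Option.bind_some]
    rw [tab_polymod hz1 hz2, hband]
    set c' := pvPolymod ((c ^^^ pvByte b) <<< 8) with hc'
    obtain ⟨r, hr1, hr2, hr3⟩ := ih c' (pvPolymod_lt _)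
      (fun y hy => hmem y (List.mem_cons_of_mem _ hy))
    refine ⟨r, hr1, ?_, hr3⟩
    exact hr2.trans (gAcc_cong bs (pvPolymod_cong _))


-- ===== VERDICT (by name: the statement is the Claim_ definition above) =====
theorem findKey_spec : Claim_equal_findKey := by
  intro msgBody _ hpre
  obtain ⟨hne, hhd, hmem⟩ := hpre
  obtain ⟨x, xs, rfl⟩ : ∃ x xs, msgBody = x :: xs := by
    cases msgBody with
    | nil => exact absurd rfl hne
    | cons a l => exact ⟨a, l, rfl⟩
  have hx0 : (0:Int) ≤ x := by simpa using hhd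
  have hx1 : x < 256 := (hmem x List.mem_cons_self).2
  unfold Spec_findKey findKey findKey_alt
  simp only []
  -- A's range fold = fold over the tail
  have hrw := PySem.List.foldl_pyRange_pyGetD (x :: xs) (0:Int)
    (fun c? v => c?.bind (fun c => PySem.List.pyGet? pvCrcTable (PySem.Int.bxor c v)))
    (some (255:Int)) (by omega : (0:Int) ≤ 1)
  simp only [List.drop_succ_cons, List.drop_zero, Int.toNat_one] at hrw ⊢
  simp only [hrw]
  -- A's crc
  obtain ⟨r, hr256, hrcong, hrfold⟩ := A_fold xs 255 (by omega)
    (fun y hy => hmem y (List.mem_cons_of_mem _ hy))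
  rw [show ((255:Nat) : Int) = (255:Int) from rfl] at hrfold
  rw [hrfold]
  -- B's crc
  obtain ⟨hB256, hBcong⟩ := pvFoldF_spec (n := pvAccum (x :: xs)) le_rfl
  have hcongEq : Cong (pvAccum (x :: xs)) (xs.foldl (fun N b => (N ^^^ pvByte b) <<< 8) 255) := by
    rw [pvAccum_eq]; exact Cong.refl _
  have hreq : r = pvFoldF (Nat.size (pvAccum (x :: xs))) (pvAccum (x :: xs)) :=
    cong_unique (hrcong.trans ((hBcong.trans hcongEq).symm)) hr256 hB256
  -- head byte
  have hhead : PySem.Int.bxor x 255 = ((x.toNat ^^^ 255 : Nat) : Int) := by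
    have := PySem.Int.bxor_of_nonneg hx0 (by norm_num : (0:Int) ≤ 255)
    rw [this]
    rfl
  have hv : x.toNat ^^^ 255 < 256 :=
    Nat.xor_lt_two_pow (n := 8) (by norm_num; omega) (by norm_num)
  have hidx := T3 ⟨x.toNat ^^^ 255, hv⟩
  simp only [PySem.List.pyGet?_zero_cons, List.headD_cons, hhead, hidx]
  have hbyte : pvByte ((x.toNat ^^^ 255 : Nat) : Int) = x.toNat ^^^ 255 := by
    rw [pvByte_nonneg (by positivity) (by exact_mod_cast hv)]
    exact Int.toNat_natCast _
  rw [hbyte, ← hreq, PySem.Int.bxor_natCast]
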